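-- pv_equiv track=rewrite | github.com/teddyoweh/itera-dev | itera_lib/itera_lib/__init__.py | _handle_small_file_diff
-- ===== SOURCE A (Python) =====
-- def _handle_small_file_diff(a_lines, b_lines):
--     result = f"\nLine-by-line comparison:\n"
--     max_lines = max(len(a_lines), len(b_lines))
--     found_diff = False
--
--     for i in range(max_lines):
--         if i < len(a_lines) and i < len(b_lines):
--             if a_lines[i] != b_lines[i]:
--                 found_diff = True
--                 result += f"Line {i+1}:\n"
--                 result += f"\033[91m- {a_lines[i]}\033[0m\n"
--                 result += f"\033[92m+ {b_lines[i]}\033[0m\n"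
--         elif i < len(a_lines):
--             found_diff = True
--             result += f"Line {i+1}:\n"
--             result += f"\033[91m- {a_lines[i]}\033[0m\n"
--         elif i < len(b_lines):
--             found_diff = True
--             result += f"Line {i+1}:\n"
--             result += f"\033[92m+ {b_lines[i]}\033[0m\n"
--
--     if not found_diff:
--         result += f"No visible text changes (possibly whitespace or line ending changes)\n"
--     return result
-- ===== SOURCE B (Python) =====
-- def _handle_small_file_diff(a_lines, b_lines):
--     n = min(len(a_lines), len(b_lines))
--     parts = []
--     for i, (a, b) in enumerate(zip(a_lines, b_lines)):
--         if a != b: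
--             parts.append(f"Line {i+1}:\n\033[91m- {a}\033[0m\n\033[92m+ {b}\033[0m\n")
--     for i, a in enumerate(a_lines[n:], start=n):
--         parts.append(f"Line {i+1}:\n\033[91m- {a}\033[0m\n")
--     for i, b in enumerate(b_lines[n:], start=n):
--         parts.append(f"Line {i+1}:\n\033[92m+ {b}\033[0m\n")
--     if not parts:
--         parts.append("No visible text changes (possibly whitespace or line ending changes)\n")
--     return "\nLine-by-line comparison:\n" + "".join(parts)
-- ===== Notes on version B (the rewrite author's own statement) =====
-- stated objective: simpler
-- what changed: Replaces A's single index loop over range(max(len)) with three branches and a found_diff flag by an index-free zip pass over the common prefix plus one tail pass per list, collecting blocks in a list joined once.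
import Mathlib
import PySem

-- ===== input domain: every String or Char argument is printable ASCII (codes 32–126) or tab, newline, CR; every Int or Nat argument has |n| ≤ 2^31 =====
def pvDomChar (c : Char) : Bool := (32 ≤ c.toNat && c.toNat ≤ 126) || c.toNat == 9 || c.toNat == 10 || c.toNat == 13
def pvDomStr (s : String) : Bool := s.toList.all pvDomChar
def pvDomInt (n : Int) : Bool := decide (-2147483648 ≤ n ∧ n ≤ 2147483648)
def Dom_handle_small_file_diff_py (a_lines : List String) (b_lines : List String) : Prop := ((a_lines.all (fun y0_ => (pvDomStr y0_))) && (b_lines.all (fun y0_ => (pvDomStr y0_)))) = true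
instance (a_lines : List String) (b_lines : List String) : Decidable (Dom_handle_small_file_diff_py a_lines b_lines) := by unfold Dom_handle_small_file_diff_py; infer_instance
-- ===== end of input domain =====

-- B replaces A's index loop over range(max) with an index-free zip pass plus two tail
-- passes, collecting blocks in a list joined once (objective: simpler decomposition).

-- ===== PORT A =====
-- loop body of A's 'for i in range(max_lines)': state = (result, found_diff)
def pvABody (a_lines b_lines : List String) (st : String × Bool) (i : Nat) : String × Bool :=
  if i < a_lines.length ∧ i < b_lines.length then
    if a_lines.getD i "" ≠ b_lines.getD i "" then
      (st.1 ++ ("Line " ++ toString (i+1) ++ ":\n")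
            ++ ("\x1b[91m- " ++ a_lines.getD i "" ++ "\x1b[0m\n")
            ++ ("\x1b[92m+ " ++ b_lines.getD i "" ++ "\x1b[0m\n"), true)
    else st
  else if i < a_lines.length then
    (st.1 ++ ("Line " ++ toString (i+1) ++ ":\n")
          ++ ("\x1b[91m- " ++ a_lines.getD i "" ++ "\x1b[0m\n"), true)
  else if i < b_lines.length then
    (st.1 ++ ("Line " ++ toString (i+1) ++ ":\n")
          ++ ("\x1b[92m+ " ++ b_lines.getD i "" ++ "\x1b[0m\n"), true)
  else st

def handle_small_file_diff_py (a_lines : List String) (b_lines : List String) : String :=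
  let max_lines := max a_lines.length b_lines.length
  let r := (List.range max_lines).foldl (pvABody a_lines b_lines) ("\nLine-by-line comparison:\n", false)
  if !r.2 then r.1 ++ "No visible text changes (possibly whitespace or line ending changes)\n"
  else r.1

-- ===== PORT B =====
def pvBlockBoth (i : Nat) (a b : String) : String :=
  "Line " ++ toString (i+1) ++ ":\n\x1b[91m- " ++ a ++ "\x1b[0m\n\x1b[92m+ " ++ b ++ "\x1b[0m\n"
def pvBlockDel (i : Nat) (a : String) : String :=
  "Line " ++ toString (i+1) ++ ":\n\x1b[91m- " ++ a ++ "\x1b[0m\n"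
def pvBlockAdd (i : Nat) (b : String) : String :=
  "Line " ++ toString (i+1) ++ ":\n\x1b[92m+ " ++ b ++ "\x1b[0m\n"

-- 'for i, (a, b) in enumerate(zip(a_lines, b_lines))'
def pvAltCommon : Nat → List (String × String) → List String
  | _, [] => []
  | i, (a, b) :: rest => (if a ≠ b then [pvBlockBoth i a b] else []) ++ pvAltCommon (i+1) rest

-- 'for i, a in enumerate(a_lines[n:], start=n)'
def pvAltDel : Nat → List String → List String
  | _, [] => []
  | i, a :: rest => pvBlockDel i a :: pvAltDel (i+1) rest

-- 'for i, b in enumerate(b_lines[n:], start=n)'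
def pvAltAdd : Nat → List String → List String
  | _, [] => []
  | i, b :: rest => pvBlockAdd i b :: pvAltAdd (i+1) rest

def handle_small_file_diff_py_alt (a_lines : List String) (b_lines : List String) : String :=
  let n := min a_lines.length b_lines.length
  let parts := pvAltCommon 0 (a_lines.zip b_lines) ++ pvAltDel n (a_lines.drop n) ++ pvAltAdd n (b_lines.drop n)
  let parts := if parts = [] then ["No visible text changes (possibly whitespace or line ending changes)\n"] else parts
  "\nLine-by-line comparison:\n" ++ String.join parts

-- ===== PRECONDITION & SPEC =====
def Spec_handle_small_file_diff_py (a_lines : List String) (b_lines : List String) (out : String) : Prop := out = handle_small_file_diff_py_alt a_lines b_lines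
instance (a_lines : List String) (b_lines : List String) (out : String) : Decidable (Spec_handle_small_file_diff_py a_lines b_lines out) := by unfold Spec_handle_small_file_diff_py; infer_instance

-- ===== CLAIM (what is proved, stated in full; the proofs are below) =====
def Claim_equal_handle_small_file_diff_py : Prop := ∀ (a_lines : List String) (b_lines : List String), Dom_handle_small_file_diff_py a_lines b_lines → Spec_handle_small_file_diff_py a_lines b_lines (handle_small_file_diff_py a_lines b_lines)

-- ===== LEMMAS AND PROOFS =====

theorem pv_join_cons (s : String) (l : List String) : String.join (s :: l) = s ++ String.join l := by
  simp [String.join_eq]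

theorem pv_join_append (l1 l2 : List String) : String.join (l1 ++ l2) = String.join l1 ++ String.join l2 := by
  simp [String.join_eq]

theorem pv_blockBoth (i : Nat) (a b : String) :
    pvBlockBoth i a b
    = ("Line " ++ toString (i+1) ++ ":\n") ++ ("\x1b[91m- " ++ a ++ "\x1b[0m\n") ++ ("\x1b[92m+ " ++ b ++ "\x1b[0m\n") := by
  have h1 : (":\n\x1b[91m- " : String) = ":\n" ++ "\x1b[91m- " := by decide
  have h2 : ("\x1b[0m\n\x1b[92m+ " : String) = "\x1b[0m\n" ++ "\x1b[92m+ " := by decide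
  unfold pvBlockBoth; rw [h1, h2]; simp only [String.append_assoc]

theorem pv_blockDel (i : Nat) (a : String) :
    pvBlockDel i a = ("Line " ++ toString (i+1) ++ ":\n") ++ ("\x1b[91m- " ++ a ++ "\x1b[0m\n") := by
  have h1 : (":\n\x1b[91m- " : String) = ":\n" ++ "\x1b[91m- " := by decide
  unfold pvBlockDel; rw [h1]; simp only [String.append_assoc]

theorem pv_blockAdd (i : Nat) (b : String) :
    pvBlockAdd i b = ("Line " ++ toString (i+1) ++ ":\n") ++ ("\x1b[92m+ " ++ b ++ "\x1b[0m\n") := by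
  have h1 : (":\n\x1b[92m+ " : String) = ":\n" ++ "\x1b[92m+ " := by decide
  unfold pvBlockAdd; rw [h1]; simp only [String.append_assoc]

-- common segment: fold over indices [k, n) equals joining B's common blocks
theorem pv_common (a b : List String) (m : Nat) : ∀ (k : Nat) (st : String × Bool),
    m = min a.length b.length - k → k ≤ min a.length b.length →
    (List.range' k m).foldl (pvABody a b) st
      = (st.1 ++ String.join (pvAltCommon k ((a.drop k).zip (b.drop k))),
         st.2 || !(pvAltCommon k ((a.drop k).zip (b.drop k))).isEmpty) := by
  induction m with
  | zero =>
    intro k st hm hk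
    have hz : (a.drop k).zip (b.drop k) = [] := by
      rcases Nat.le_total a.length b.length with h | h
      · have : a.drop k = [] := List.drop_eq_nil_of_le (by omega)
        simp [this]
      · have : b.drop k = [] := List.drop_eq_nil_of_le (by omega)
        simp [this]
    simp [hz, pvAltCommon, String.join]
  | succ m ih =>
    intro k st hm hk
    have hka : k < a.length := by omega
    have hkb : k < b.length := by omega
    have ga : a.getD k "" = a[k] := List.getD_eq_getElem a "" hka
    have gb : b.getD k "" = b[k] := List.getD_eq_getElem b "" hkb
    rw [List.range'_succ, List.foldl_cons,
        List.drop_eq_getElem_cons hka, List.drop_eq_getElem_cons hkb, List.zip_cons_cons]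
    by_cases hne : a[k] = b[k]
    · have hbody : pvABody a b st k = st := by
        simp [pvABody, hka, hkb, ga, gb, hne]
      rw [hbody, ih (k+1) st (by omega) (by omega)]
      simp [pvAltCommon, hne]
    · have hbody : pvABody a b st k
          = (st.1 ++ ("Line " ++ toString (k+1) ++ ":\n")
                  ++ ("\x1b[91m- " ++ a[k] ++ "\x1b[0m\n")
                  ++ ("\x1b[92m+ " ++ b[k] ++ "\x1b[0m\n"), true) := by
        simp [pvABody, hka, hkb, ga, gb, hne]
      rw [hbody, ih (k+1) _ (by omega) (by omega)]
      have hc : pvAltCommon k ((a[k], b[k]) :: ((a.drop (k+1)).zip (b.drop (k+1))))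
           = pvBlockBoth k a[k] b[k] :: pvAltCommon (k+1) ((a.drop (k+1)).zip (b.drop (k+1))) := by
        simp [pvAltCommon, hne]
      rw [hc, pv_join_cons, pv_blockBoth]
      simp [String.append_assoc]

-- a-tail: fold over indices [k, |a|) when |b| ≤ k
theorem pv_del (a b : List String) (m : Nat) : ∀ (k : Nat) (st : String × Bool),
    m = a.length - k → b.length ≤ k →
    (List.range' k m).foldl (pvABody a b) st
      = (st.1 ++ String.join (pvAltDel k (a.drop k)), st.2 || !(a.drop k).isEmpty) := by
  induction m with
  | zero =>
    intro k st hm hk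
    have : a.drop k = [] := List.drop_eq_nil_of_le (by omega)
    simp [this, pvAltDel, String.join]
  | succ m ih =>
    intro k st hm hk
    have hka : k < a.length := by omega
    have ga : a.getD k "" = a[k] := List.getD_eq_getElem a "" hka
    have hbody : pvABody a b st k
        = (st.1 ++ ("Line " ++ toString (k+1) ++ ":\n")
                ++ ("\x1b[91m- " ++ a[k] ++ "\x1b[0m\n"), true) := by
      simp [pvABody, hka, ga]; omega
    rw [List.range'_succ, List.foldl_cons, hbody, ih (k+1) _ (by omega) (by omega),
        List.drop_eq_getElem_cons hka]
    have hc : pvAltDel k (a[k] :: a.drop (k+1)) = pvBlockDel k a[k] :: pvAltDel (k+1) (a.drop (k+1)) := by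
      simp [pvAltDel]
    rw [hc, pv_join_cons, pv_blockDel]
    simp [String.append_assoc, hka]

-- b-tail: fold over indices [k, |b|) when |a| ≤ k
theorem pv_add (a b : List String) (m : Nat) : ∀ (k : Nat) (st : String × Bool),
    m = b.length - k → a.length ≤ k →
    (List.range' k m).foldl (pvABody a b) st
      = (st.1 ++ String.join (pvAltAdd k (b.drop k)), st.2 || !(b.drop k).isEmpty) := by
  induction m with
  | zero =>
    intro k st hm hk
    have : b.drop k = [] := List.drop_eq_nil_of_le (by omega)
    simp [this, pvAltAdd, String.join]
  | succ m ih =>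
    intro k st hm hk
    have hkb : k < b.length := by omega
    have gb : b.getD k "" = b[k] := List.getD_eq_getElem b "" hkb
    have hbody : pvABody a b st k
        = (st.1 ++ ("Line " ++ toString (k+1) ++ ":\n")
                ++ ("\x1b[92m+ " ++ b[k] ++ "\x1b[0m\n"), true) := by
      have hna : ¬ k < a.length := by omega
      simp [pvABody, hna, hkb, gb]
    rw [List.range'_succ, List.foldl_cons, hbody, ih (k+1) _ (by omega) (by omega),
        List.drop_eq_getElem_cons hkb]
    have hc : pvAltAdd k (b[k] :: b.drop (k+1)) = pvBlockAdd k b[k] :: pvAltAdd (k+1) (b.drop (k+1)) := by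
      simp [pvAltAdd]
    rw [hc, pv_join_cons, pv_blockAdd]
    simp [String.append_assoc, hkb]

-- ===== VERDICT (by name: the statement is the Claim_ definition above) =====
theorem handle_small_file_diff_py_spec : Claim_equal_handle_small_file_diff_py := by
  intro a b _
  have hsplit : List.range (max a.length b.length)
      = List.range' 0 (min a.length b.length) ++ List.range' (min a.length b.length) (max a.length b.length - min a.length b.length) := by
    rw [List.range_eq_range',
        show max a.length b.length = min a.length b.length + (max a.length b.length - min a.length b.length) by omega,
        ← List.range'_append]
    simp
  simp only [Spec_handle_small_file_diff_py, handle_small_file_diff_py, handle_small_file_diff_py_alt]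
  rw [hsplit, List.foldl_append, pv_common a b (min a.length b.length) 0 _ (by omega) (by omega)]
  set n := min a.length b.length with hn
  rcases Nat.le_total b.length a.length with h | h
  · have hbn : b.length = n := by omega
    have hM : max a.length b.length - n = a.length - n := by omega
    rw [hM, pv_del a b _ n _ rfl (by omega)]
    have hbd : b.drop n = [] := List.drop_eq_nil_of_le (by omega)
    simp only [hbd, pvAltAdd, List.drop_zero, List.append_nil]
    cases hC : pvAltCommon 0 (a.zip b) with
    | nil =>
      cases hD : a.drop n with
      | nil => simp [pvAltDel, pvAltAdd, String.join]
      | cons x xs =>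
        simp only [hD, pvAltDel, List.isEmpty_cons, List.isEmpty_nil]
        simp [pv_join_cons, String.append_assoc, String.join]
    | cons c cs =>
      simp only [List.isEmpty_cons]
      simp [pv_join_append, pv_join_cons, String.append_assoc]
  · have han : a.length = n := by omega
    have hM : max a.length b.length - n = b.length - n := by omega
    rw [hM, pv_add a b _ n _ rfl (by omega)]
    have had : a.drop n = [] := List.drop_eq_nil_of_le (by omega)
    simp only [had, pvAltDel, List.drop_zero, List.nil_append]
    cases hC : pvAltCommon 0 (a.zip b) with
    | nil =>
      cases hD : b.drop n with
      | nil => simp [pvAltDel, pvAltAdd, String.join]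
      | cons x xs =>
        simp only [hD, pvAltAdd, List.isEmpty_cons, List.isEmpty_nil]
        simp [pv_join_cons, String.append_assoc, String.join]
    | cons c cs =>
      simp only [List.isEmpty_cons]
      simp [pv_join_append, pv_join_cons, String.append_assoc]
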